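-- pv_equiv track=rewrite | github.com/ProgramminguyFromScratch/appel.py | appel.py | generate_replay_code
-- ===== SOURCE A (Python) =====
-- def key_code(keys):
--     code = str(
--         int("D" in keys)
--         + int("A" in keys) * 2
--         + int("S" in keys) * 4
--         + int("W" in keys) * 8
--     )
--     return code
--
-- def generate_replay_code(inputs, level=11, username="bruteforcer"):
--     try:
--         output = ""
--         for i in range(len(inputs)):
--             keys = inputs[i]  # Each element is now a string of keys for that frame
--             if i == 0 or inputs[i] != inputs[i - 1]:  # Compare current frame to previous
--                 output += f"Ǉ{i+1}Ǉ{key_code(keys)}"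
--         output = f"{username}ǇǇ{level + 1}Ǉ1{output}Ǉ{len(inputs)+1}Ǉ0"
--         return f"{len(output) + 12345678}{output}"
--     except UnboundLocalError:
--         return "Nothing was found"
-- ===== SOURCE B (Python) =====
-- def key_code(keys):
--     code = str(
--         int("D" in keys)
--         + int("A" in keys) * 2
--         + int("S" in keys) * 4
--         + int("W" in keys) * 8
--     )
--     return code
--
-- def generate_replay_code(inputs, level=11, username="bruteforcer"):
--     # Run-grouping pass: one entry per maximal run of equal consecutive frames.
--     parts = []
--     i, n = 0, len(inputs)
--     while i < n:
--         v = inputs[i]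
--         parts.append(f"\u01c7{i+1}\u01c7{key_code(v)}")
--         i += 1
--         while i < n and inputs[i] == v:
--             i += 1
--     output = f"{username}\u01c7\u01c7{level + 1}\u01c71{''.join(parts)}\u01c7{len(inputs)+1}\u01c70"
--     return f"{len(output) + 12345678}{output}"
-- ===== Notes on version B (the rewrite author's own statement) =====
-- stated objective: alternative
-- what changed: Replaces A's per-index loop comparing inputs[i] with inputs[i-1] by a run-grouping scan: an outer loop emits an entry for the first frame of each maximal run of equal consecutive frames, an inner loop skips the rest of the run, and the entries are collected in a list and joined once; the dead UnboundLocalError handler is dropped.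
import Mathlib
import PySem

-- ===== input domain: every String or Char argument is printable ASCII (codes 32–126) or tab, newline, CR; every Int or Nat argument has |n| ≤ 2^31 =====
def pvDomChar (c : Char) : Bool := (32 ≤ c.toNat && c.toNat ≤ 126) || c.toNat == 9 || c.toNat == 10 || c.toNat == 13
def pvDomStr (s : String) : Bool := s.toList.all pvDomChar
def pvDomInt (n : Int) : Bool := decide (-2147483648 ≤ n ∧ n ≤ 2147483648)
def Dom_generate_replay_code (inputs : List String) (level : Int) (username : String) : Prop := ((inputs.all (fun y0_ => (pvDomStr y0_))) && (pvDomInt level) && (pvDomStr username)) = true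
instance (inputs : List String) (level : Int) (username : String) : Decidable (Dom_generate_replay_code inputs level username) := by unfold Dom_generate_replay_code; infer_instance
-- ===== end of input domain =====

-- B groups consecutive equal frames in one run-skipping pass instead of A's index loop
-- comparing inputs[i] with inputs[i-1]; same output everywhere ('alternative' objective).
-- A's except-UnboundLocalError branch is dead code (output is pre-initialised), so both are total.

-- ===== PORT A =====
def key_code (keys : String) : String :=
  PySem.Int.toStr
    ((if PySem.Str.isIn "D" keys then (1 : Int) else 0)
      + (if PySem.Str.isIn "A" keys then (1 : Int) else 0) * 2
      + (if PySem.Str.isIn "S" keys then (1 : Int) else 0) * 4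
      + (if PySem.Str.isIn "W" keys then (1 : Int) else 0) * 8)

def generate_replay_code (inputs : List String) (level : Int) (username : String) : String :=
  let output : String :=
    (PySem.List.pyRange 0 (inputs.length : Int) 1).foldl
      (fun output i =>
        let keys := PySem.List.pyGetD inputs i ""
        if i == 0 || !(PySem.List.pyGetD inputs i "" == PySem.List.pyGetD inputs (i - 1) "") then
          output ++ "Ǉ" ++ PySem.Int.toStr (i + 1) ++ "Ǉ" ++ key_code keys
        else output) ""
  let output2 : String :=
    username ++ "ǇǇ" ++ PySem.Int.toStr (level + 1) ++ "Ǉ1" ++ output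
      ++ "Ǉ" ++ PySem.Int.toStr ((inputs.length : Int) + 1) ++ "Ǉ0"
  PySem.Int.toStr (PySem.Str.len output2 + 12345678) ++ output2

-- ===== PORT B =====
def grcEntry (i : Int) (v : String) : String :=
  "Ǉ" ++ PySem.Int.toStr (i + 1) ++ "Ǉ" ++ key_code v

-- one list element per maximal run of equal consecutive frames (Source B's while/while scan)
def grcGroups : List String → Int → List String
  | [], _ => []
  | v :: rest, i =>
      grcEntry i v ::
        grcGroups (rest.dropWhile (· == v)) (i + 1 + ((rest.takeWhile (· == v)).length : Int))
termination_by l => l.length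
decreasing_by
  simpa using Nat.lt_succ_of_le (List.length_dropWhile_le _ _)

def generate_replay_code_alt (inputs : List String) (level : Int) (username : String) : String :=
  let body := String.join (grcGroups inputs 0)
  let output : String :=
    username ++ "ǇǇ" ++ PySem.Int.toStr (level + 1) ++ "Ǉ1" ++ body
      ++ "Ǉ" ++ PySem.Int.toStr ((inputs.length : Int) + 1) ++ "Ǉ0"
  PySem.Int.toStr (PySem.Str.len output + 12345678) ++ output

-- ===== PRECONDITION & SPEC =====
def Spec_generate_replay_code (inputs : List String) (level : Int) (username : String) (out : String) : Prop := out = generate_replay_code_alt inputs level username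
instance (inputs : List String) (level : Int) (username : String) (out : String) : Decidable (Spec_generate_replay_code inputs level username out) := by unfold Spec_generate_replay_code; infer_instance

-- ===== CLAIM (what is proved, stated in full; the proofs are below) =====
def Claim_equal_generate_replay_code : Prop := ∀ (inputs : List String) (level : Int) (username : String), Dom_generate_replay_code inputs level username → Spec_generate_replay_code inputs level username (generate_replay_code inputs level username)

-- ===== LEMMAS AND PROOFS =====

-- A's per-index loop, rephrased structurally with the previous frame carried along.
def aLoop : List String → Option String → Int → String → String
  | [], _, _, acc => acc
  | x :: t, prev, i, acc =>
      aLoop t (some x) (i + 1) (if prev == some x then acc else acc ++ grcEntry i x)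

-- Step 1: the pyRange/pyGetD fold of port A equals aLoop.
theorem getD_append_len (pre : List String) (x : String) (t : List String) (d : String) :
    (pre ++ x :: t).getD pre.length d = x := by
  induction pre with
  | nil => rfl
  | cons a p ih => simpa using ih

theorem getD_append_pred (a : String) (p : List String) (r : List String) (d : String) :
    ((a :: p) ++ r).getD ((a :: p).length - 1) d = (a :: p).getLast (by simp) := by
  induction p generalizing a with
  | nil => rfl
  | cons b p ih => simpa using ih b

theorem aFold_eq_aLoop (suf pre : List String) (acc : String) :
    (PySem.List.pyRange (pre.length : Int) (((pre ++ suf).length : Int)) 1).foldl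
      (fun output i =>
        if i == 0 || !(PySem.List.pyGetD (pre ++ suf) i "" == PySem.List.pyGetD (pre ++ suf) (i - 1) "") then
          output ++ "Ǉ" ++ PySem.Int.toStr (i + 1) ++ "Ǉ" ++ key_code (PySem.List.pyGetD (pre ++ suf) i "")
        else output) acc
    = aLoop suf pre.getLast? (pre.length : Int) acc := by
  induction suf generalizing pre acc with
  | nil =>
      rw [PySem.List.pyRange_one_eq_nil (by simp)]
      rfl
  | cons x t ih =>
      have hlt : (pre.length : Int) < ((pre ++ x :: t).length : Int) := by
        simp
      rw [PySem.List.pyRange_one_cons hlt, List.foldl_cons]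
      have hget : PySem.List.pyGetD (pre ++ x :: t) (pre.length : Int) "" = x := by
        rw [PySem.List.pyGetD_natCast]; exact getD_append_len pre x t ""
      rw [hget]
      have hcond : (((pre.length : Int) == 0)
          || !(x == PySem.List.pyGetD (pre ++ x :: t) ((pre.length : Int) - 1) ""))
          = !(pre.getLast? == some x) := by
        cases pre with
        | nil => simp
        | cons a p =>
            have h0 : ((((a :: p).length : Int)) == 0) = false := by
              simp only [List.length_cons, beq_eq_false_iff_ne, ne_eq]
              omega
            have hprev : PySem.List.pyGetD ((a :: p) ++ x :: t) (((a :: p).length : Int) - 1) ""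
                = (a :: p).getLast (by simp) := by
              have hc : (((a :: p).length : Int) - 1) = (((a :: p).length - 1 : Nat) : Int) := by
                simp
              rw [hc, PySem.List.pyGetD_natCast]
              exact getD_append_pred a p (x :: t) ""
            rw [h0, hprev]
            rw [List.getLast?_eq_getLast_of_ne_nil (by simp)]
            by_cases hxl : x = (a :: p).getLast (by simp)
            · rw [← hxl]; simp
            · simp [hxl, Ne.symm hxl]
      rw [hcond, aLoop]
      have hih := ih (pre ++ [x])
      simp only [List.append_assoc, List.singleton_append, List.length_append,
        List.length_cons, List.length_nil, List.getLast?_concat,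
        Nat.cast_add, Nat.cast_one, zero_add] at hih ⊢
      cases hc : (pre.getLast? == some x) with
      | true =>
          simp only [Bool.not_true, Bool.false_eq_true, if_false, if_true]
          rw [← hih acc]
      | false =>
          simp only [Bool.not_false, if_true, Bool.false_eq_true, if_false]
          rw [← hih (acc ++ grcEntry (pre.length : Int) x)]
          congr 1
          simp [grcEntry, String.append_assoc]

-- Step 2: skipping a run: aLoop with prev = some v over t starting with copies of v.
theorem aLoop_run (t : List String) (v : String) (i : Int) (acc : String) :
    aLoop t (some v) i acc
      = aLoop (t.dropWhile (· == v)) (some v) (i + ((t.takeWhile (· == v)).length : Int)) acc := by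
  induction t generalizing i acc with
  | nil => simp [aLoop]
  | cons x t ih =>
      by_cases hx : x = v
      · subst hx
        simp only [List.dropWhile_cons, List.takeWhile_cons, beq_self_eq_true, if_true,
          List.length_cons, Nat.cast_add, Nat.cast_one]
        have hstep : aLoop (x :: t) (some x) i acc = aLoop t (some x) (i + 1) acc := by
          rw [aLoop]; simp
        rw [hstep, ih]
        have h2 : i + 1 + ((t.takeWhile (· == x)).length : Int)
            = i + (((t.takeWhile (· == x)).length : Int) + 1) := by ring
        rw [h2]
      · have hb : (x == v) = false := beq_eq_false_iff_ne.mpr hx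
        simp [hb]

theorem foldl_append_str (l : List String) (a b : String) :
    List.foldl (fun r s => r ++ s) (a ++ b) l = a ++ List.foldl (fun r s => r ++ s) b l := by
  induction l generalizing b with
  | nil => rfl
  | cons x t ih => simp only [List.foldl_cons]; rw [String.append_assoc, ih]

theorem foldl_append_str' (l : List String) (a : String) :
    List.foldl (fun r s => r ++ s) a l = a ++ List.foldl (fun r s => r ++ s) "" l := by
  have := foldl_append_str l a ""
  simpa using this

-- Step 3: aLoop at a run boundary equals the joined group entries.
theorem aLoop_eq_join (n : Nat) (suf : List String) (hn : suf.length ≤ n) (prev : Option String)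
    (hprev : ∀ x, suf.head? = some x → prev ≠ some x) (i : Int) (acc : String) :
    aLoop suf prev i acc = acc ++ String.join (grcGroups suf i) := by
  induction n generalizing suf prev i acc with
  | zero =>
      have : suf = [] := List.eq_nil_of_length_eq_zero (Nat.le_zero.mp hn)
      subst this; simp [aLoop, grcGroups, String.join]
  | succ n ih =>
      match suf with
      | [] => simp [aLoop, grcGroups, String.join]
      | v :: t =>
          have hne : prev ≠ some v := hprev v rfl
          have hb : (prev == some v) = false := beq_eq_false_iff_ne.mpr hne
          rw [aLoop, hb]
          simp only [Bool.false_eq_true, if_false]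
          rw [aLoop_run]
          have hlen : (t.dropWhile (· == v)).length ≤ n := by
            have := List.length_dropWhile_le (· == v) t
            simp at hn; omega
          have hhead : ∀ x, (t.dropWhile (· == v)).head? = some x → (some v : Option String) ≠ some x := by
            intro x hx hvx
            have hmatch := List.head?_dropWhile_not (· == v) t
            rw [hx] at hmatch
            simp at hmatch
            exact hmatch (by injection hvx with h; exact h.symm)
          rw [ih _ hlen _ hhead]
          rw [grcGroups]
          simp only [String.join, List.foldl_cons]
          conv_rhs => rw [show ("" : String) ++ grcEntry i v = grcEntry i v by simp,
            foldl_append_str']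
          rw [String.append_assoc]

-- Bodies agree.
theorem body_eq (inputs : List String) :
    (PySem.List.pyRange 0 (inputs.length : Int) 1).foldl
      (fun output i =>
        if i == 0 || !(PySem.List.pyGetD inputs i "" == PySem.List.pyGetD inputs (i - 1) "") then
          output ++ "Ǉ" ++ PySem.Int.toStr (i + 1) ++ "Ǉ" ++ key_code (PySem.List.pyGetD inputs i "")
        else output) ""
    = String.join (grcGroups inputs 0) := by
  have h := aFold_eq_aLoop inputs [] ""
  simp only [List.nil_append, List.length_nil, Nat.cast_zero, List.getLast?_nil] at h
  rw [h, aLoop_eq_join inputs.length inputs le_rfl none (by intro x _; simp) 0 ""]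
  simp

-- ===== VERDICT (by name: the statement is the Claim_ definition above) =====
theorem generate_replay_code_spec : Claim_equal_generate_replay_code := by
  intro inputs level username _
  unfold Spec_generate_replay_code generate_replay_code generate_replay_code_alt
  rw [body_eq]
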